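-- pv_equiv track=rewrite | github.com/GustikS/GNNwLRNNs | data/python/convertor.py | get_bonds
-- ===== SOURCE A (Python) =====
-- def get_bonds(pairList):
--     bond = 0
--     bonds = []
--     for ind, (i, j) in enumerate(pairList):
--
--         if ind % 2 == 0:
--             suff = "l"
--             bond += 1
--         else:
--             suff = "r"
--
--         next = f' bond(a{i}, a{j}, b{bond}{suff})'
--         bonds.append(next)
--     return bonds
-- ===== SOURCE B (Python) =====
-- def get_bonds(pairList):
--     bonds = []
--     bond = 0
--     it = iter(pairList)
--     for (i, j) in it:
--         bond += 1
--         bonds.append(f' bond(a{i}, a{j}, b{bond}l)')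
--         try:
--             (i, j) = next(it)
--         except StopIteration:
--             break
--         bonds.append(f' bond(a{i}, a{j}, b{bond}r)')
--     return bonds
-- ===== Notes on version B (the rewrite author's own statement) =====
-- stated objective: simpler
-- what changed: B consumes the list two elements per outer step via an explicit iterator, so one bond number per step and no parity test or index is needed; A enumerates and tests ind % 2 each iteration.
import Mathlib
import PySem

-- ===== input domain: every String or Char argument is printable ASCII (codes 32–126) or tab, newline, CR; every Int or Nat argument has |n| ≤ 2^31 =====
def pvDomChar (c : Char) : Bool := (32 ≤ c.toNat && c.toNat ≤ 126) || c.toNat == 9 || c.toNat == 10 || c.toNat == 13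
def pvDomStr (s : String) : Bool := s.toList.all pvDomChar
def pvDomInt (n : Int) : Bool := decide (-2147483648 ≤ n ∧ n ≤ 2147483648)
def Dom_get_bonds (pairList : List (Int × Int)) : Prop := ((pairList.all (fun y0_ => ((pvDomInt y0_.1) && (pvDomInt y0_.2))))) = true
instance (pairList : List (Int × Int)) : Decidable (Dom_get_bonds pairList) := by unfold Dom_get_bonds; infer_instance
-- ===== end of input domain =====

-- B pairs the elements two per outer step (one bond number per step, no parity test); same output as A.

-- the f-string ' bond(a{i}, a{j}, b{bond}{suff})', shared by both Pythons verbatim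
def bondStr (i j bond : Int) (suff : String) : String :=
  " bond(a" ++ PySem.Int.toStr i ++ ", a" ++ PySem.Int.toStr j ++ ", b" ++ PySem.Int.toStr bond ++ suff ++ ")"

-- ===== PORT A =====
-- the enumerate-for loop of A, state = (index, bond, bonds)
def getBondsLoopA : Nat → Int → List String → List (Int × Int) → List String
  | _, _, bonds, [] => bonds
  | ind, bond, bonds, (i, j) :: rest =>
    let p : String × Int := if ind % 2 == 0 then ("l", bond + 1) else ("r", bond)
    getBondsLoopA (ind + 1) p.2 (bonds ++ [bondStr i j p.2 p.1]) rest

def get_bonds (pairList : List (Int × Int)) : List String :=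
  getBondsLoopA 0 0 [] pairList

-- ===== PORT B =====
-- B's outer loop: each step takes up to two pairs and owns one bond number
def getBondsLoopB : Int → List (Int × Int) → List String
  | _, [] => []
  | bond, [(i, j)] => [bondStr i j (bond + 1) "l"]
  | bond, (i, j) :: (k, l) :: rest =>
    bondStr i j (bond + 1) "l" :: bondStr k l (bond + 1) "r" :: getBondsLoopB (bond + 1) rest

def get_bonds_alt (pairList : List (Int × Int)) : List String :=
  getBondsLoopB 0 pairList

-- ===== PRECONDITION & SPEC =====
def Spec_get_bonds (pairList : List (Int × Int)) (out : List String) : Prop := out = get_bonds_alt pairList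
instance (pairList : List (Int × Int)) (out : List String) : Decidable (Spec_get_bonds pairList out) := by unfold Spec_get_bonds; infer_instance

-- ===== CLAIM (what is proved, stated in full; the proofs are below) =====
def Claim_equal_get_bonds : Prop := ∀ (pairList : List (Int × Int)), Dom_get_bonds pairList → Spec_get_bonds pairList (get_bonds pairList)

-- ===== LEMMAS AND PROOFS =====

lemma stepA_even (ind : Nat) (h : ind % 2 = 0) (bond : Int) (acc : List String)
    (i j : Int) (rest : List (Int × Int)) :
    getBondsLoopA ind bond acc ((i, j) :: rest)
      = getBondsLoopA (ind + 1) (bond + 1) (acc ++ [bondStr i j (bond + 1) "l"]) rest := by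
  simp [getBondsLoopA, h]

lemma stepA_odd (ind : Nat) (h : ind % 2 = 1) (bond : Int) (acc : List String)
    (i j : Int) (rest : List (Int × Int)) :
    getBondsLoopA ind bond acc ((i, j) :: rest)
      = getBondsLoopA (ind + 1) bond (acc ++ [bondStr i j bond "r"]) rest := by
  simp [getBondsLoopA, h]

lemma getBonds_key : ∀ (bond : Int) (l : List (Int × Int)), ∀ (k : Nat) (acc : List String),
    getBondsLoopA (2 * k) bond acc l = acc ++ getBondsLoopB bond l := by
  intro bond l
  induction bond, l using getBondsLoopB.induct with
  | case1 bond => intro k acc; simp [getBondsLoopA, getBondsLoopB]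
  | case2 bond i j =>
    intro k acc
    rw [stepA_even _ (by omega)]
    simp [getBondsLoopA, getBondsLoopB]
  | case3 bond i j x y rest ih =>
    intro k acc
    rw [stepA_even _ (by omega), stepA_odd _ (by omega),
        show 2 * k + 1 + 1 = 2 * (k + 1) by omega, ih (k + 1)]
    simp [getBondsLoopB]

-- ===== VERDICT (by name: the statement is the Claim_ definition above) =====
theorem get_bonds_spec : Claim_equal_get_bonds := by
  intro pairList _
  unfold Spec_get_bonds get_bonds get_bonds_alt
  simpa using getBonds_key 0 pairList 0 []
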